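-- pv_equiv track=rewrite | github.com/ConvLab/ConvLab-3 | convlab/nlg/scgpt/util.py | dict2seq
-- ===== SOURCE A (Python) =====
-- def dict2seq(d):
--     '''
--     dict: [domain: { intent: [slot, value] }]
--     seq: [domain { intent ( slot = value ; ) @ } | ]
--     '''
--     s = ''
--     first_domain = True
--     first_intent = True
--     first_slot = True
--     for domain in d:
--         if not first_domain:
--             s += ' | '
--         s += domain
--         s += ' { '
--         first_domain = False
--         first_intent = True
--         for intent in d[domain]:
--             if not first_intent:
--                 s += ' @ '
--             s += intent
--             s += ' ( '
--             first_intent = False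
--             first_slot = True
--             for slot, value in d[domain][intent]:
--                 if not first_slot:
--                     s += ' ; '
--                 s += slot
--                 if value:
--                     s += ' = '
--                     s += value
--                 first_slot = False
--             s += ' )'
--         s += ' }'
--     return s.lower()
-- ===== SOURCE B (Python) =====
-- def dict2seq(d):
--     # Divide-and-conquer: glue(items, sep, fmt) splits the list in halves and
--     # concatenates the two rendered halves with a single separator between them,
--     # so the n-1 separators appear without any first-element flag logic.
--     def glue(items, sep, fmt):
--         if not items:
--             return ''
--         if len(items) == 1:
--             return fmt(items[0])
--         mid = len(items) // 2
--         return glue(items[:mid], sep, fmt) + sep + glue(items[mid:], sep, fmt)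
--
--     def slot(p):
--         s, v = p
--         return s + ' = ' + v if v else s
--
--     def intent(p):
--         name, pairs = p
--         return name + ' ( ' + glue(pairs, ' ; ', slot) + ' )'
--
--     def domain(p):
--         name, intents = p
--         return name + ' { ' + glue(list(intents.items()), ' @ ', intent) + ' }'
--
--     return glue(list(d.items()), ' | ', domain).lower()
-- ===== Notes on version B (the rewrite author's own statement) =====
-- stated objective: alternative
-- what changed: Replaces A's single running string accumulator with three first_* separator flags by a recursive divide-and-conquer renderer: a generic glue(items, sep, fmt) splits each list in halves and concatenates the rendered halves with one separator, used at all three nesting levels.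
import Mathlib
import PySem

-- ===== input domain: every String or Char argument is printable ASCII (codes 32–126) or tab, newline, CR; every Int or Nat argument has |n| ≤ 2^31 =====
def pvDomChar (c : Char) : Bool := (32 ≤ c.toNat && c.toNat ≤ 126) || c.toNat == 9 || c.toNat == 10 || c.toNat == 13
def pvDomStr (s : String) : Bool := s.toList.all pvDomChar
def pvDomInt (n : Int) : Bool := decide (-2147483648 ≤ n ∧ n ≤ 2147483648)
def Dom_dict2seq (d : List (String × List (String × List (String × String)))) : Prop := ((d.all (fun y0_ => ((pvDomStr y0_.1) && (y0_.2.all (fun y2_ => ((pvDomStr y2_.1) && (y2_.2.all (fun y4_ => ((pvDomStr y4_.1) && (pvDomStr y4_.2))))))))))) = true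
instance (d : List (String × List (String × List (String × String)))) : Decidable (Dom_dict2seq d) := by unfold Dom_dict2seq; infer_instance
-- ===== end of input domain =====

-- B replaces A's flat loops with first_* separator flags by a recursive
-- divide-and-conquer renderer (halve, render, concatenate with one separator);
-- return value only, no mutation.

-- ===== PORT A =====
-- `for domain in d` iterates the dict's keys; `d[domain]` is the (first-match) lookup.
-- The key comes from the key list, so the KeyError branch of `d[domain]` is unreachable
-- and `.getD []` never supplies its default.
def dict2seq (d : List (String × List (String × List (String × String)))) : String :=
  let r := (d.map Prod.fst).foldl (fun (st : String × Bool) (domain : String) =>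
    -- s += ' | ' (unless first_domain); s += domain; s += ' { '
    let s1 := (if st.2 then st.1 else st.1 ++ " | ") ++ domain ++ " { "
    let intents := (List.lookup domain d).getD []
    let r2 := (intents.map Prod.fst).foldl (fun (st2 : String × Bool) (intent : String) =>
      let s2 := (if st2.2 then st2.1 else st2.1 ++ " @ ") ++ intent ++ " ( "
      let pairs := (List.lookup intent intents).getD []
      let r3 := pairs.foldl (fun (st3 : String × Bool) (sv : String × String) =>
        let s3 := (if st3.2 then st3.1 else st3.1 ++ " ; ") ++ sv.1
        (if sv.2 ≠ "" then s3 ++ " = " ++ sv.2 else s3, false)) (s2, true)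
      (r3.1 ++ " )", false)) (s1, true)
    (r2.1 ++ " }", false)) ("", true)
  PySem.Str.lower r.1

-- ===== PORT B =====
-- glue(items, sep, fmt): split in halves, render, join with one separator.
def glue {α : Type} (sep : String) (fmt : α → String) : List α → String
  | [] => ""
  | [x] => fmt x
  | x :: y :: t =>
      glue sep fmt ((x :: y :: t).take ((x :: y :: t).length / 2)) ++ sep ++
        glue sep fmt ((x :: y :: t).drop ((x :: y :: t).length / 2))
termination_by l => l.length
decreasing_by
  · simp [List.length_take]; omega
  · simp [List.length_drop]; omega

def slotStr (sv : String × String) : String :=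
  if sv.2 ≠ "" then sv.1 ++ " = " ++ sv.2 else sv.1

def intentStr (it : String × List (String × String)) : String :=
  it.1 ++ " ( " ++ glue " ; " slotStr it.2 ++ " )"

def domainStr (p : String × List (String × List (String × String))) : String :=
  p.1 ++ " { " ++ glue " @ " intentStr p.2 ++ " }"

def dict2seq_alt (d : List (String × List (String × List (String × String)))) : String :=
  PySem.Str.lower (glue " | " domainStr d)

-- ===== PRECONDITION & SPEC =====
-- Pre_ excludes association lists with duplicate domain keys or duplicate intent keys:
-- those cannot arise from a Python dict (which collapses duplicates before A sees them),
-- and first-vs-last-match behaviour on them is accidental.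
def Pre_dict2seq (d : List (String × List (String × List (String × String)))) : Prop :=
  (d.map Prod.fst).Nodup ∧ ∀ p ∈ d, (p.2.map Prod.fst).Nodup
instance (d : List (String × List (String × List (String × String)))) : Decidable (Pre_dict2seq d) := by unfold Pre_dict2seq; infer_instance

def pvWitness_dict2seq : (List (String × List (String × List (String × String)))) :=
  [("Hotel", [("Inform", [("area", "east"), ("parking", "")]), ("Request", [])])]

def Spec_dict2seq (d : List (String × List (String × List (String × String)))) (out : String) : Prop := out = dict2seq_alt d
instance (d : List (String × List (String × List (String × String)))) (out : String) : Decidable (Spec_dict2seq d out) := by unfold Spec_dict2seq; infer_instance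

-- ===== CLAIM (what is proved, stated in full; the proofs are below) =====
def Claim_equal_dict2seq : Prop := ∀ (d : List (String × List (String × List (String × String)))), Dom_dict2seq d → Pre_dict2seq d → Spec_dict2seq d (dict2seq d)

-- ===== LEMMAS AND PROOFS =====

-- proof-side linear join: joinSep sep [x1,…,xn] = x1 ++ sep ++ … ++ sep ++ xn
def joinSep (sep : String) : List String → String
  | [] => ""
  | x :: xs => xs.foldl (fun a y => a ++ sep ++ y) x

theorem foldl_pull {sep : String} : ∀ (l : List String) (s t : String),
    l.foldl (fun a y => a ++ sep ++ y) (s ++ t) = s ++ l.foldl (fun a y => a ++ sep ++ y) t := by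
  intro l
  induction l with
  | nil => intro s t; rfl
  | cons x xs ih =>
      intro s t
      rw [List.foldl_cons, List.foldl_cons,
        show s ++ t ++ sep ++ x = s ++ (t ++ sep ++ x) from by
          rw [String.append_assoc (s₁ := s) (s₂ := t) (s₃ := sep),
            String.append_assoc (s₁ := s) (s₂ := t ++ sep) (s₃ := x)]]
      exact ih s (t ++ sep ++ x)

theorem joinSep_append (sep : String) (a b : List String) (ha : a ≠ []) (hb : b ≠ []) :
    joinSep sep (a ++ b) = joinSep sep a ++ sep ++ joinSep sep b := by
  obtain ⟨x, xs, rfl⟩ := List.exists_cons_of_ne_nil ha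
  obtain ⟨y, ys, rfl⟩ := List.exists_cons_of_ne_nil hb
  show ((xs ++ y :: ys).foldl (fun a y => a ++ sep ++ y) x) = _
  rw [List.foldl_append, List.foldl_cons]
  have := foldl_pull (sep := sep) ys (xs.foldl (fun a y => a ++ sep ++ y) x ++ sep) y
  simpa [joinSep, String.append_assoc] using this

-- glue computes exactly the linear join of the rendered pieces
theorem glue_eq_joinSep {α : Type} (sep : String) (fmt : α → String) :
    ∀ (l : List α), glue sep fmt l = joinSep sep (l.map fmt) := by
  intro l
  induction hn : l.length using Nat.strong_induction_on generalizing l with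
  | _ n ih =>
    match l with
    | [] => simp [glue, joinSep]
    | [x] => simp [glue, joinSep]
    | x :: y :: t =>
      rw [glue]
      have hlen : (x :: y :: t).length = n := hn
      set m := (x :: y :: t).length / 2 with hm
      have hm1 : 1 ≤ m := by simp [hm]; omega
      have hmlt : m < (x :: y :: t).length := by simp [hm] at *; omega
      have htake : ((x :: y :: t).take m).length = m := by
        rw [List.length_take]; omega
      have hdrop : ((x :: y :: t).drop m).length = (x :: y :: t).length - m := by
        rw [List.length_drop]
      rw [ih ((x :: y :: t).take m).length (by omega) _ rfl,
          ih ((x :: y :: t).drop m).length (by omega) _ rfl]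
      rw [← joinSep_append sep _ _
          (by intro h; have := congrArg List.length h; simp only [List.length_map, List.length_nil] at this; rw [htake] at this; omega)
          (by intro h; have := congrArg List.length h; simp only [List.length_map, List.length_nil] at this; rw [hdrop] at this; omega)]
      rw [← List.map_append, List.take_append_drop]

-- joinSep-shaped images of the three render helpers
def jIntent (it : String × List (String × String)) : String :=
  it.1 ++ " ( " ++ joinSep " ; " (it.2.map slotStr) ++ " )"

def jDomain (p : String × List (String × List (String × String))) : String :=
  p.1 ++ " { " ++ joinSep " @ " (p.2.map jIntent) ++ " }"

theorem intentStr_eq : intentStr = jIntent := by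
  funext it; simp [intentStr, jIntent, glue_eq_joinSep]

theorem domainStr_eq : domainStr = jDomain := by
  funext p; simp [domainStr, jDomain, glue_eq_joinSep, intentStr_eq]

-- the shape of each of A's three separator-flag loop bodies
def sepFoldStep {α : Type} (sep : String) (g : α → String) : (String × Bool) → α → (String × Bool) :=
  fun st x => ((if st.2 then st.1 else st.1 ++ sep) ++ g x, false)

theorem sepFold_false {α : Type} (sep : String) (g : α → String) :
    ∀ (l : List α) (s : String),
    l.foldl (sepFoldStep sep g) (s, false) = ((l.map g).foldl (fun a y => a ++ sep ++ y) s, false) := by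
  intro l
  induction l with
  | nil => intro s; rfl
  | cons x xs ih => intro s; simpa [sepFoldStep] using ih (s ++ sep ++ g x)

theorem sepFold_true {α : Type} (sep : String) (g : α → String) (l : List α) (s : String) :
    (l.foldl (sepFoldStep sep g) (s, true)).1 = s ++ joinSep sep (l.map g) := by
  cases l with
  | nil => simp [joinSep]
  | cons x xs =>
      have h1 : sepFoldStep sep g (s, true) x = (s ++ g x, false) := by simp [sepFoldStep]
      rw [List.foldl_cons, h1, sepFold_false]
      simp only [List.map_cons, joinSep]
      exact foldl_pull (xs.map g) s (g x)

theorem map_keys_lookup {α β : Type} (G : String → α → β) (dflt : α) :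
    ∀ (l : List (String × α)), (l.map Prod.fst).Nodup →
    (l.map Prod.fst).map (fun k => G k ((List.lookup k l).getD dflt)) = l.map (fun p => G p.1 p.2) := by
  intro l
  induction l with
  | nil => intro _; rfl
  | cons p t ih =>
      intro h
      simp only [List.map_cons, List.nodup_cons, List.mem_map] at h ⊢
      obtain ⟨hne, hnd⟩ := h
      congr 1
      · simp [List.lookup]
      · have : ∀ k ∈ t.map Prod.fst,
            G k ((List.lookup k (p :: t)).getD dflt) = G k ((List.lookup k t).getD dflt) := by
          intro k hk
          have hkp : (k == p.1) = false := by
            rcases List.mem_map.mp hk with ⟨q, hq, rfl⟩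
            by_contra hcon
            exact hne ⟨q, hq, beq_iff_eq.mp (by simpa using (Bool.not_eq_false _).mp hcon)⟩
          simp [List.lookup, hkp]
        rw [List.map_congr_left this, ih hnd]

theorem mem_of_lookup_eq_some {α : Type} : ∀ (l : List (String × α)) (k : String) (v : α),
    l.lookup k = some v → (k, v) ∈ l := by
  intro l
  induction l with
  | nil => intro k v h; simp [List.lookup] at h
  | cons p t ih =>
      intro k v h
      obtain ⟨a, b⟩ := p
      rw [List.lookup] at h
      by_cases hk : (k == a) = true
      · simp only [hk] at h
        cases h
        simp [beq_iff_eq.mp hk]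
      · simp only [Bool.not_eq_true] at hk
        rw [hk] at h
        exact List.mem_cons_of_mem _ (ih k v h)

theorem lookup_getD_nodup {α : Type} (d : List (String × List (String × α)))
    (hin : ∀ p ∈ d, (p.2.map Prod.fst).Nodup) (k : String) :
    (((List.lookup k d).getD []).map Prod.fst).Nodup := by
  cases hlk : List.lookup k d with
  | none => simp
  | some v => simpa using hin (k, v) (mem_of_lookup_eq_some d k v hlk)

theorem dict2seq_eq_alt (d : List (String × List (String × List (String × String))))
    (h : Pre_dict2seq d) : dict2seq d = dict2seq_alt d := by
  obtain ⟨hd, hin⟩ := h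
  unfold dict2seq dict2seq_alt
  rw [glue_eq_joinSep, domainStr_eq]
  simp only
  congr 1
  -- A's slot loop, collapsed by sepFold_true
  have hslot : ∀ (s2 : String) (pairs : List (String × String)),
      (List.foldl
        (fun (st3 : String × Bool) (sv : String × String) =>
          (if sv.2 ≠ "" then (if st3.2 = true then st3.1 else st3.1 ++ " ; ") ++ sv.1 ++ " = " ++ sv.2
           else (if st3.2 = true then st3.1 else st3.1 ++ " ; ") ++ sv.1, false))
        (s2, true) pairs).1 = s2 ++ joinSep " ; " (pairs.map slotStr) := by
    intro s2 pairs
    rw [show (fun (st3 : String × Bool) (sv : String × String) =>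
          ((if sv.2 ≠ "" then (if st3.2 = true then st3.1 else st3.1 ++ " ; ") ++ sv.1 ++ " = " ++ sv.2
           else (if st3.2 = true then st3.1 else st3.1 ++ " ; ") ++ sv.1 : String), false)) =
        sepFoldStep " ; " slotStr from by
      funext st sv
      simp only [sepFoldStep, slotStr]
      split_ifs <;> simp [String.append_assoc]]
    exact sepFold_true _ _ pairs s2
  -- A's intent loop over the keys of a fixed intents dict, collapsed by sepFold_true
  have hintent : ∀ (intents : List (String × List (String × String))) (s1 : String),
      (List.foldl
        (fun (st2 : String × Bool) (intent : String) =>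
          ((List.foldl
              (fun (st3 : String × Bool) (sv : String × String) =>
                (if sv.2 ≠ "" then (if st3.2 = true then st3.1 else st3.1 ++ " ; ") ++ sv.1 ++ " = " ++ sv.2
                 else (if st3.2 = true then st3.1 else st3.1 ++ " ; ") ++ sv.1, false))
              ((if st2.2 = true then st2.1 else st2.1 ++ " @ ") ++ intent ++ " ( ", true)
              ((List.lookup intent intents).getD [])).1 ++ " )", false))
        (s1, true) (intents.map Prod.fst)).1 =
      s1 ++ joinSep " @ " ((intents.map Prod.fst).map
        (fun intent => jIntent (intent, (List.lookup intent intents).getD []))) := by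
    intro intents s1
    rw [show (fun (st2 : String × Bool) (intent : String) =>
          (((List.foldl
              (fun (st3 : String × Bool) (sv : String × String) =>
                (if sv.2 ≠ "" then (if st3.2 = true then st3.1 else st3.1 ++ " ; ") ++ sv.1 ++ " = " ++ sv.2
                 else (if st3.2 = true then st3.1 else st3.1 ++ " ; ") ++ sv.1, false))
              ((if st2.2 = true then st2.1 else st2.1 ++ " @ ") ++ intent ++ " ( ", true)
              ((List.lookup intent intents).getD [])).1 ++ " )" : String), false)) =
        sepFoldStep " @ " (fun intent => jIntent (intent, (List.lookup intent intents).getD [])) from by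
      funext st2 intent
      rw [hslot]
      simp [sepFoldStep, jIntent, String.append_assoc]]
    exact sepFold_true _ _ _ s1
  -- A's domain-level loop body, rewritten pointwise (no membership needed: lookup_getD_nodup covers every key)
  rw [show (fun (st : String × Bool) (domain : String) =>
        ((List.foldl
            (fun (st2 : String × Bool) (intent : String) =>
              ((List.foldl
                  (fun (st3 : String × Bool) (sv : String × String) =>
                    (if sv.2 ≠ "" then (if st3.2 = true then st3.1 else st3.1 ++ " ; ") ++ sv.1 ++ " = " ++ sv.2
                     else (if st3.2 = true then st3.1 else st3.1 ++ " ; ") ++ sv.1, false))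
                  ((if st2.2 = true then st2.1 else st2.1 ++ " @ ") ++ intent ++ " ( ", true)
                  ((List.lookup intent ((List.lookup domain d).getD [])).getD [])).1 ++ " )", false))
            ((if st.2 = true then st.1 else st.1 ++ " | ") ++ domain ++ " { ", true)
            (((List.lookup domain d).getD []).map Prod.fst)).1 ++ " }", false)) =
      sepFoldStep " | " (fun domain => jDomain (domain, (List.lookup domain d).getD [])) from by
    funext st domain
    rw [hintent]
    rw [map_keys_lookup (fun k v => jIntent (k, v)) [] ((List.lookup domain d).getD [])
        (lookup_getD_nodup d hin domain)]
    simp [sepFoldStep, jDomain, String.append_assoc]]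
  rw [sepFold_true, map_keys_lookup (fun k v => jDomain (k, v)) [] d hd]
  simp

-- ===== VERDICT (by name: the statement is the Claim_ definition above) =====
theorem dict2seq_spec : Claim_equal_dict2seq := by
  intro d _ hpre
  unfold Spec_dict2seq
  exact dict2seq_eq_alt d hpre
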